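-- pv_equiv track=rewrite | github.com/sachinhegde137/Algorithms_and_DS | GCD_and_LCM/between_two_sets.py | get_between_two_sets
-- ===== SOURCE A (Python) =====
-- from math import gcd
-- from functools import reduce
--
-- def lcm(a, b):
--     out = a * b // gcd(a, b)
--     return out
--
-- def find_lcm(int_list):
--     out = reduce(lcm, int_list)
--     return out
--
-- def find_gcd(int_list):
--     out = reduce(gcd, int_list)
--     return out
--
-- def get_between_two_sets(a, b):
--     lcm_a = find_lcm(a)
--     gcd_b = find_gcd(b)
--
--     num_list = []
--     if gcd_b % lcm_a != 0:
--         total = 0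
--     else:
--         total = int(gcd_b / lcm_a)
--         for i in range(1, total+1):
--             if gcd_b % (lcm_a * i) != 0:
--                 total -= 1
--             else:
--                 num_list.append(lcm_a * i)
--
--     return total, num_list
-- ===== SOURCE B (Python) =====
-- from math import gcd
--
--
-- def get_between_two_sets(a, b):
--     # L = lcm-chain of a, g = gcd-chain of b (as A's reduce does)
--     L = a[0]
--     for x in a[1:]:
--         L = L * x // gcd(L, x)
--     g = b[0]
--     for y in b[1:]:
--         g = gcd(g, y)
--     if g % L != 0:
--         return 0, []
--     q = g // L
--     # numbers between the two sets are L*d for each divisor d of q;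
--     # enumerate divisors in O(sqrt(q)) pairs, then sort
--     divs = []
--     d = 1
--     while d * d <= q:
--         if q % d == 0:
--             divs.append(d)
--             if d != q // d:
--                 divs.append(q // d)
--         d += 1
--     divs.sort()
--     return len(divs), [L * d for d in divs]
-- ===== Notes on version B (the rewrite author's own statement) =====
-- stated objective: alternative
-- what changed: A tests every candidate i = 1..gcd_b/lcm_a for divisibility in one linear scan; B instead enumerates the divisor pairs (d, q//d) of q = gcd_b/lcm_a up to sqrt(q) and sorts them (on the generated inputs the shared lcm/gcd chain computation dominates, so this was not measured as faster).
-- intended difference: When exactly one of lcm-chain(a) and gcd-chain(b) is negative (odd number of negatives in a XOR b a single negative) and the nonzero gcd-chain is divisible by the lcm-chain, A returns the negative quotient as the count, e.g. (-2, []) on ([-2],[4]), because its loop range is empty and total keeps the initial negative value; B returns the intended (0, []) since no positive multiple of the lcm-chain divides the gcd-chain there. — e.g. on get_between_two_sets([-2], [4]): A returns (-2, []), B returns (0, [])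
import Mathlib
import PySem

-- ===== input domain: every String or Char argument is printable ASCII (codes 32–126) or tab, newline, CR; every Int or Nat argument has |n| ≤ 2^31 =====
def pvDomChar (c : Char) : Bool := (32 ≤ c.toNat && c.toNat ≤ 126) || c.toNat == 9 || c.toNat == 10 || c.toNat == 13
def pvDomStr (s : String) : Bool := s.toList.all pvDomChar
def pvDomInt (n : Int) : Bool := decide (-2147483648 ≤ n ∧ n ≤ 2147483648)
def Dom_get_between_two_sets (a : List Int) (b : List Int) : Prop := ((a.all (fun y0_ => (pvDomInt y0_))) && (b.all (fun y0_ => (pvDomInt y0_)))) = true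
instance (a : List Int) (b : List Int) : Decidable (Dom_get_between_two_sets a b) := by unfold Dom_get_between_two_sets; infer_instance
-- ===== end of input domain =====

-- B replaces A's linear scan over all candidates i = 1..gcd_b/lcm_a by a divisor-pair enumeration
-- of q = gcd_b/lcm_a up to sqrt(q) followed by a sort; on the exceptional sign configuration where
-- A returns a negative "count" (see D_ below), B returns the intended (0, []).

-- ===== PORT A =====
-- lcm(a, b) = a * b // gcd(a, b)
def pyLcm (x y : Int) : Int := PySem.Int.floordiv (x * y) (Int.gcd x y)

-- functools.reduce(f, xs): raises TypeError on []; Pre_ excludes empty lists, the [] value is junk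
def pyReduce (f : Int → Int → Int) : List Int → Int
  | [] => 0
  | h :: t => t.foldl f h

def get_between_two_sets (a : List Int) (b : List Int) : Int × List Int :=
  let lcm_a := pyReduce pyLcm a
  let gcd_b := pyReduce (fun x y => (Int.gcd x y : Int)) b
  if PySem.Int.mod gcd_b lcm_a ≠ 0 then (0, [])
  else
    -- int(gcd_b / lcm_a): exact, because under the branch condition lcm_a divides gcd_b, so the
    -- correctly rounded float quotient is the exact integer quotient, |it| ≤ 2^31 < 2^53
    let total := PySem.Int.truncdiv gcd_b lcm_a
    (PySem.List.pyRange 1 (total + 1) 1).foldl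
      (fun (s : Int × List Int) i =>
        if PySem.Int.mod gcd_b (lcm_a * i) ≠ 0 then (s.1 - 1, s.2)
        else (s.1, s.2 ++ [lcm_a * i]))
      (total, [])

-- ===== PORT B =====
-- 'while d * d <= q: if q % d == 0: append d (and q // d when distinct); d += 1', as structural
-- recursion on the fuel (q + 1 - d).toNat, which the loop decrements by exactly one per iteration
def divLoopAux : Nat → Int → Int → List Int → List Int
  | 0, _, _, divs => divs
  | fuel + 1, q, d, divs =>
    if d * d ≤ q then
      divLoopAux fuel q (d + 1)
        (if PySem.Int.mod q d = 0 then
          divs ++ [d] ++ (if d ≠ PySem.Int.floordiv q d then [PySem.Int.floordiv q d] else [])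
        else divs)
    else divs

def divLoop (q d : Int) (divs : List Int) : List Int := divLoopAux (q + 1 - d).toNat q d divs

def get_between_two_sets_alt (a : List Int) (b : List Int) : Int × List Int :=
  -- L = a[0] folded with L * x // gcd(L, x); g = b[0] folded with gcd ([] raises IndexError: excluded by Pre_)
  let L := match a with
    | [] => 0
    | h :: t => t.foldl (fun x y => PySem.Int.floordiv (x * y) (Int.gcd x y)) h
  let g := match b with
    | [] => 0
    | h :: t => t.foldl (fun x y => (Int.gcd x y : Int)) h
  if PySem.Int.mod g L ≠ 0 then (0, [])
  else
    let q := PySem.Int.floordiv g L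
    let divs := PySem.List.sorted (divLoop q 1 []) (fun x => x) false
    ((divs.length : Int), divs.map (fun d => L * d))

-- ===== PRECONDITION & SPEC =====
-- Pre_ excludes exactly the inputs on which A raises: empty a or b (TypeError in reduce) and 0 ∈ a
-- (the lcm chain is 0 — raising ZeroDivisionError inside lcm or at gcd_b % 0)
def Pre_get_between_two_sets (a : List Int) (b : List Int) : Prop :=
  a ≠ [] ∧ b ≠ [] ∧ (0 : Int) ∉ a
instance (a : List Int) (b : List Int) : Decidable (Pre_get_between_two_sets a b) := by
  unfold Pre_get_between_two_sets; infer_instance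

def pvWitness_get_between_two_sets : List Int × List Int := ([2], [4])

-- On inputs where exactly one of lcm-chain(a), gcd-chain(b) is negative (a has an odd number of
-- negatives XOR b is a single negative) while the chains divide (nonzero gcd-chain divisible by the
-- lcm-chain), A returns the negative quotient as the count, (gcd_b/lcm_a, []), because its range is
-- empty and total keeps the initial negative value; B returns the intended (0, []) — no positive
-- multiple of the lcm-chain divides the gcd-chain in that sign configuration.
def D_get_between_two_sets (a : List Int) (b : List Int) : Prop :=
  ((a.countP (fun x => decide (x < 0))) % 2 = 1 ↔ ¬ (b.length = 1 ∧ ∀ x ∈ b, x < 0)) ∧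
  (b.map Int.natAbs).foldl Nat.gcd 0 ≠ 0 ∧
  (a.map Int.natAbs).foldl Nat.lcm 1 ∣ (b.map Int.natAbs).foldl Nat.gcd 0
instance (a : List Int) (b : List Int) : Decidable (D_get_between_two_sets a b) := by
  unfold D_get_between_two_sets; infer_instance

def Spec_get_between_two_sets (a : List Int) (b : List Int) (out : Int × List Int) : Prop :=
  ¬ D_get_between_two_sets a b → out = get_between_two_sets_alt a b
instance (a : List Int) (b : List Int) (out : Int × List Int) : Decidable (Spec_get_between_two_sets a b out) := by
  unfold Spec_get_between_two_sets; infer_instance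

def pvDiffWitness_get_between_two_sets : List Int × List Int := ([-2], [4])
def pvDiffWitnessOut_get_between_two_sets : (Int × List Int) × (Int × List Int) := ((-2, []), (0, []))

-- ===== CLAIM (what is proved, stated in full; the proofs are below) =====
def Claim_unchanged_get_between_two_sets : Prop := ∀ (a : List Int) (b : List Int), Dom_get_between_two_sets a b → Pre_get_between_two_sets a b → Spec_get_between_two_sets a b (get_between_two_sets a b)
def Claim_changed_get_between_two_sets : Prop := Dom_get_between_two_sets (pvDiffWitness_get_between_two_sets.1) (pvDiffWitness_get_between_two_sets.2) ∧ Pre_get_between_two_sets (pvDiffWitness_get_between_two_sets.1) (pvDiffWitness_get_between_two_sets.2) ∧ D_get_between_two_sets (pvDiffWitness_get_between_two_sets.1) (pvDiffWitness_get_between_two_sets.2) ∧ get_between_two_sets (pvDiffWitness_get_between_two_sets.1) (pvDiffWitness_get_between_two_sets.2) = pvDiffWitnessOut_get_between_two_sets.1 ∧ get_between_two_sets_alt (pvDiffWitness_get_between_two_sets.1) (pvDiffWitness_get_between_two_sets.2) = pvDiffWitnessOut_get_between_two_sets.2 ∧ pvDiffWitnessOut_get_between_two_sets.1 ≠ pv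DiffWitnessOut_get_between_two_sets.2
def Claim_exact_get_between_two_sets : Prop := ∀ (a : List Int) (b : List Int), Dom_get_between_two_sets a b → Pre_get_between_two_sets a b → D_get_between_two_sets a b → get_between_two_sets a b ≠ get_between_two_sets_alt a b

-- ===== LEMMAS AND PROOFS =====

lemma gcd_cast_pos {x : Int} (y : Int) (hx : x ≠ 0) : (0:Int) < (Int.gcd x y : Int) := by
  exact_mod_cast Nat.pos_of_ne_zero (fun h => hx (Int.gcd_eq_zero_iff.mp h).1)

lemma gcd_dvd_mul (x y : Int) : (Int.gcd x y : Int) ∣ x * y :=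
  Dvd.dvd.mul_right (Int.gcd_dvd_left x y) y

lemma pyLcm_eq (x y : Int) : pyLcm x y = x * y / (Int.gcd x y : Int) := by
  unfold pyLcm PySem.Int.floordiv
  exact Int.fdiv_eq_ediv_of_dvd (gcd_dvd_mul x y)

lemma pyLcm_natAbs (x y : Int) :
    (pyLcm x y).natAbs = Nat.lcm x.natAbs y.natAbs := by
  rw [pyLcm_eq, Int.natAbs_ediv_of_dvd (gcd_dvd_mul x y)]
  simp [Int.natAbs_mul, Nat.lcm, Int.gcd]

lemma pyLcm_ne_zero {x y : Int} (hx : x ≠ 0) (hy : y ≠ 0) : pyLcm x y ≠ 0 := by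
  rw [pyLcm_eq]
  intro h
  have := Int.ediv_mul_cancel (gcd_dvd_mul x y)
  rw [h] at this
  simp at this
  tauto

lemma pyLcm_neg_iff {x y : Int} (hx : x ≠ 0) (hy : y ≠ 0) :
    (pyLcm x y < 0) ↔ ¬ (x < 0 ↔ y < 0) := by
  rw [pyLcm_eq]
  have hg := gcd_cast_pos y hx
  have hmul := Int.ediv_mul_cancel (gcd_dvd_mul x y)
  constructor
  · intro h
    have hxy : x * y < 0 := by nlinarith
    rcases mul_neg_iff.mp hxy with ⟨h1, h2⟩ | ⟨h1, h2⟩ <;>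
      · intro hiff
        rcases hiff with ⟨f1, f2⟩
        omega
  · intro h
    have hxy : x * y < 0 := by
      rcases lt_or_gt_of_ne hx with h1 | h1 <;> rcases lt_or_gt_of_ne hy with h2 | h2
      · exact absurd (iff_of_true h1 h2) h
      · exact mul_neg_of_neg_of_pos h1 h2
      · exact mul_neg_of_pos_of_neg h1 h2
      · exact absurd (iff_of_false (by omega) (by omega)) h
    by_contra hge
    push_neg at hge
    nlinarith [mul_nonneg hge (le_of_lt hg)]

lemma foldl_pyLcm_spec (t : List Int) : ∀ (acc : Int), acc ≠ 0 → (∀ x ∈ t, x ≠ 0) →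
    (t.foldl pyLcm acc ≠ 0) ∧
    (t.foldl pyLcm acc).natAbs = (t.map Int.natAbs).foldl Nat.lcm acc.natAbs ∧
    ((t.foldl pyLcm acc < 0) ↔ ((acc < 0) ↔ (t.countP (fun x => decide (x < 0))) % 2 = 0)) := by
  induction t with
  | nil => intro acc hacc _; simpa using hacc
  | cons x t ih =>
    intro acc hacc hmem
    have hx : x ≠ 0 := hmem x (by simp)
    have hmem' : ∀ y ∈ t, y ≠ 0 := fun y hy => hmem y (by simp [hy])
    have hacc' : pyLcm acc x ≠ 0 := pyLcm_ne_zero hacc hx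
    obtain ⟨h1, h2, h3⟩ := ih (pyLcm acc x) hacc' hmem'
    refine ⟨h1, ?_, ?_⟩
    · simpa [pyLcm_natAbs] using h2
    · rw [List.foldl_cons, h3, List.countP_cons]
      have hsgn := pyLcm_neg_iff hacc hx
      by_cases hxneg : x < 0 <;> simp [hxneg] at hsgn ⊢ <;> rw [hsgn] <;>
        constructor <;> intro hh <;> omega

def gcdF (x y : Int) : Int := (Int.gcd x y : Int)

lemma foldl_gcdF_natAbs (t : List Int) : ∀ acc : Int,
    (t.foldl gcdF acc).natAbs = (t.map Int.natAbs).foldl Nat.gcd acc.natAbs := by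
  induction t with
  | nil => intro acc; rfl
  | cons x t ih =>
    intro acc
    rw [List.foldl_cons, ih]
    simp [gcdF, Int.gcd]

lemma foldl_gcdF_nonneg (t : List Int) : ∀ acc : Int, 0 ≤ acc → 0 ≤ t.foldl gcdF acc := by
  induction t with
  | nil => intro acc h; simpa using h
  | cons x t ih =>
    intro acc _
    refine ih _ ?_
    simp only [gcdF]
    positivity

-- facts about A's lcm chain over a = ah :: at with no zero element
lemma L_facts (ah : Int) (at_ : List Int) (h0 : (0:Int) ∉ ah :: at_) :
    at_.foldl pyLcm ah ≠ 0 ∧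
    (at_.foldl pyLcm ah).natAbs = ((ah :: at_).map Int.natAbs).foldl Nat.lcm 1 ∧
    ((at_.foldl pyLcm ah < 0) ↔ ((ah :: at_).countP (fun x => decide (x < 0))) % 2 = 1) := by
  have hah : ah ≠ 0 := by intro h; exact h0 (by simp [h])
  have hmem : ∀ x ∈ at_, x ≠ 0 := by
    intro x hx h
    exact h0 (by simp [h ▸ hx])
  obtain ⟨h1, h2, h3⟩ := foldl_pyLcm_spec at_ ah hah hmem
  refine ⟨h1, ?_, ?_⟩
  · simpa using h2
  · rw [h3, List.countP_cons]
    by_cases hneg : ah < 0 <;> simp [hneg] <;> constructor <;> intro hh <;> omega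

-- facts about A's gcd chain over b = bh :: bt
lemma G_facts (bh : Int) (bt : List Int) :
    (bt.foldl gcdF bh).natAbs = ((bh :: bt).map Int.natAbs).foldl Nat.gcd 0 ∧
    ((bt.foldl gcdF bh < 0) ↔ (bt = [] ∧ bh < 0)) := by
  constructor
  · simpa using foldl_gcdF_natAbs bt bh
  · cases bt with
    | nil => simp
    | cons x bt' =>
      have : 0 ≤ (x :: bt').foldl gcdF bh := by
        rw [List.foldl_cons]
        refine foldl_gcdF_nonneg bt' _ ?_
        simp only [gcdF]
        positivity
      constructor
      · intro h; omega
      · rintro ⟨h, -⟩; cases h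

-- the ascending list of the positive divisors of q, as A's loop produces it
def ascDivs (q : Int) : List Int := (PySem.List.pyRange 1 (q + 1) 1).filter (fun i => decide (i ∣ q))

lemma mem_ascDivs {q x : Int} (hq : 0 < q) : x ∈ ascDivs q ↔ x ∣ q ∧ 1 ≤ x := by
  unfold ascDivs
  rw [List.mem_filter]
  simp only [PySem.List.mem_pyRange_one, decide_eq_true_eq]
  constructor
  · rintro ⟨⟨h1, h2⟩, h3⟩; exact ⟨h3, h1⟩
  · rintro ⟨h1, h2⟩
    exact ⟨⟨h2, by have := Int.le_of_dvd hq h1; omega⟩, h1⟩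

lemma pairwise_ascDivs (q : Int) : (ascDivs q).Pairwise (· < ·) :=
  (PySem.List.pairwise_lt_pyRange_one 1 (q + 1)).filter _

lemma nodup_ascDivs (q : Int) : (ascDivs q).Nodup :=
  (pairwise_ascDivs q).imp ne_of_lt

lemma dle_of_sq_le {d q : Int} (h : d * d ≤ q) : d ≤ q := by
  nlinarith [sq_nonneg d, sq_nonneg (d - 1)]

lemma divLoopAux_spec (q : Int) (hq : 0 < q) : ∀ (n : Nat) (d : Int) (acc : List Int),
    n = (q + 1 - d).toNat → 1 ≤ d →
    (∀ x ∈ acc, x ∣ q ∧ 1 ≤ x ∧ (x < d ∨ q < x * d)) → acc.Nodup →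
    (divLoopAux n q d acc).Nodup ∧
    ∀ x, (x ∈ divLoopAux n q d acc ↔ x ∈ acc ∨ (x ∣ q ∧ d ≤ x ∧ x * d ≤ q)) := by
  intro n
  induction n with
  | zero =>
    intro d acc hn hd hinv hnd
    refine ⟨hnd, fun x => ?_⟩
    simp only [divLoopAux]
    constructor
    · exact Or.inl
    · rintro (h | ⟨h1, h2, h3⟩)
      · exact h
      · exfalso
        have hx1 : 1 ≤ x := le_trans hd h2
        have : q + 1 ≤ d := by omega
        nlinarith
  | succ n ih =>
    intro d acc hn hd hinv hnd
    simp only [divLoopAux]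
    by_cases hsq : d * d ≤ q
    · rw [if_pos hsq]
      have hdq : d ≤ q := dle_of_sq_le hsq
      have hn' : n = (q + 1 - (d + 1)).toNat := by omega
      have hmod : (PySem.Int.mod q d = 0) ↔ (d ∣ q) := PySem.Int.mod_eq_zero_iff_dvd q d
      by_cases hdvd : d ∣ q
      · rw [if_pos (hmod.mpr hdvd)]
        have hdpos : (0:Int) < d := by omega
        have hfl : PySem.Int.floordiv q d = q / d := PySem.Int.floordiv_eq_ediv_of_pos hdpos
        set c := PySem.Int.floordiv q d with hc
        have hcd : c * d = q := by rw [hfl]; exact Int.ediv_mul_cancel hdvd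
        have hcpos : 0 < c := by nlinarith
        have hcged : d ≤ c := by nlinarith
        have hcdvd : c ∣ q := ⟨d, hcd.symm⟩
        set acc' := acc ++ [d] ++ (if d ≠ c then [c] else []) with hacc'
        have hmem' : ∀ x ∈ acc', x ∣ q ∧ 1 ≤ x ∧ (x < d + 1 ∨ q < x * (d + 1)) := by
          intro x hx
          simp only [hacc', List.mem_append, List.mem_singleton] at hx
          rcases hx with (hx | rfl) | hx
          · obtain ⟨g1, g2, g3⟩ := hinv x hx
            refine ⟨g1, g2, ?_⟩
            rcases g3 with g3 | g3
            · left; omega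
            · right; nlinarith
          · exact ⟨hdvd, hd, by left; omega⟩
          · have hxc : x = c := by
              rcases Decidable.em (d = c) with hne | hne
              · simp [hne] at hx
              · simpa [hne] using hx
            subst hxc
            refine ⟨hcdvd, by omega, Or.inr ?_⟩
            nlinarith
        have hdnotin : d ∉ acc := by
          intro hmemd
          obtain ⟨-, -, g3⟩ := hinv d hmemd
          rcases g3 with g3 | g3 <;> nlinarith
        have hcnotin : c ∉ acc := by
          intro hmemc
          obtain ⟨-, -, g3⟩ := hinv c hmemc
          rcases g3 with g3 | g3 <;> nlinarith
        have hnd1 : (acc ++ [d]).Nodup :=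
          List.nodup_append.mpr ⟨hnd, List.nodup_singleton d,
            by
              intro a ha b hb
              rw [List.mem_singleton] at hb
              subst hb
              exact fun h => hdnotin (h ▸ ha)⟩
        have hnd' : acc'.Nodup := by
          rcases Decidable.em (d = c) with hne | hne
          · rw [hacc', if_neg (by simp [hne])]
            simpa using hnd1
          · rw [hacc', if_pos hne]
            refine List.nodup_append.mpr ⟨hnd1, List.nodup_singleton c, ?_⟩
            intro x hx b hb
            rw [List.mem_singleton] at hb
            subst hb
            intro hxc
            rcases List.mem_append.mp hx with h | h
            · exact hcnotin (hxc ▸ h)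
            · rw [List.mem_singleton] at h
              exact hne (by rw [← h]; exact hxc)
        obtain ⟨ih1, ih2⟩ := ih (d + 1) acc' hn' (by omega) hmem' hnd'
        refine ⟨ih1, fun x => ?_⟩
        rw [ih2 x]
        simp only [hacc', List.mem_append, List.mem_singleton]
        constructor
        · rintro (((hx | rfl) | hx) | ⟨h1, h2, h3⟩)
          · exact Or.inl hx
          · exact Or.inr ⟨hdvd, le_refl _, hsq⟩
          · have hxc : x = c := by
              rcases Decidable.em (d = c) with hne | hne
              · simp [hne] at hx
              · simpa [hne] using hx
            subst hxc
            exact Or.inr ⟨hcdvd, hcged, le_of_eq hcd⟩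
          · refine Or.inr ⟨h1, by omega, by nlinarith⟩
        · rintro (hx | ⟨h1, h2, h3⟩)
          · exact Or.inl (Or.inl (Or.inl hx))
          · by_cases hxd : x = d
            · exact Or.inl (Or.inl (Or.inr hxd))
            · have hxgt : d + 1 ≤ x := by omega
              by_cases hfut : x * (d + 1) ≤ q
              · exact Or.inr ⟨h1, hxgt, hfut⟩
              · push_neg at hfut
                obtain ⟨k, hk⟩ := h1
                have hxpos : (0:Int) < x := by omega
                have hkd : k = d := by nlinarith
                have hxc : x = c := by
                  have hxe : x * d = c * d := by rw [hcd, hk, hkd]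
                  exact mul_right_cancel₀ (by omega) hxe
                rcases Decidable.em (d = c) with hne | hne
                · exact Or.inl (Or.inl (Or.inr (by omega)))
                · refine Or.inl (Or.inr ?_)
                  simp [hne, hxc]
      · rw [if_neg (fun h => hdvd (hmod.mp h))]
        obtain ⟨ih1, ih2⟩ := ih (d + 1) acc hn' (by omega)
          (by
            intro x hx
            obtain ⟨g1, g2, g3⟩ := hinv x hx
            refine ⟨g1, g2, ?_⟩
            rcases g3 with g3 | g3
            · left; omega
            · right; nlinarith) hnd
        refine ⟨ih1, fun x => ?_⟩
        rw [ih2 x]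
        constructor
        · rintro (hx | ⟨h1, h2, h3⟩)
          · exact Or.inl hx
          · exact Or.inr ⟨h1, by omega, by nlinarith⟩
        · rintro (hx | ⟨h1, h2, h3⟩)
          · exact Or.inl hx
          · have hxd : x ≠ d := by rintro rfl; exact hdvd h1
            have hxgt : d + 1 ≤ x := by omega
            refine Or.inr ⟨h1, hxgt, ?_⟩
            by_contra hfut
            push_neg at hfut
            obtain ⟨k, hk⟩ := h1
            have hxpos : (0:Int) < x := by omega
            have hkd : k = d := by nlinarith
            exact hdvd ⟨x, by rw [hk, hkd]; ring⟩
    · rw [if_neg hsq]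
      refine ⟨hnd, fun x => ?_⟩
      constructor
      · exact Or.inl
      · rintro (hx | ⟨h1, h2, h3⟩)
        · exact hx
        · exfalso
          have hx1 : 1 ≤ x := le_trans hd h2
          nlinarith

lemma divLoop_sorted (q : Int) (hq : 0 < q) :
    PySem.List.sorted (divLoop q 1 []) (fun x => x) false = ascDivs q := by
  unfold divLoop
  obtain ⟨hnd, hmem⟩ := divLoopAux_spec q hq (q + 1 - 1).toNat 1 [] rfl (le_refl 1)
    (by intro x hx; cases hx) List.nodup_nil
  refine PySem.List.sorted_eq_of_perm_of_pairwise_lt _ _ _ ?_ (pairwise_ascDivs q)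
  rw [List.perm_ext_iff_of_nodup (nodup_ascDivs q) hnd]
  intro x
  rw [mem_ascDivs hq, hmem x]
  simp only [List.not_mem_nil, false_or]
  constructor
  · rintro ⟨h1, h2⟩
    exact ⟨h1, h2, by simpa using Int.le_of_dvd hq h1⟩
  · rintro ⟨h1, h2, -⟩
    exact ⟨h1, h2⟩

-- shape of A's counting loop
lemma foldA_shape (p : Int → Prop) [DecidablePred p] (m : Int → Int) (xs : List Int) :
    ∀ (t0 : Int) (l0 : List Int),
    xs.foldl (fun (s : Int × List Int) i => if p i then (s.1 - 1, s.2) else (s.1, s.2 ++ [m i])) (t0, l0)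
      = (t0 - (xs.countP (fun i => decide (p i)) : Int),
         l0 ++ (xs.filter (fun i => decide (¬ p i))).map m) := by
  induction xs with
  | nil => intro t0 l0; simp
  | cons x xs ih =>
    intro t0 l0
    rw [List.foldl_cons, List.countP_cons, List.filter_cons]
    by_cases hx : p x
    · have e1 : (decide (p x)) = true := by simpa using hx
      have e2 : (decide (¬ p x)) = false := by simpa using hx
      rw [if_pos hx, ih, e1, e2, if_pos rfl, if_neg (by simp)]
      simp only [Prod.mk.injEq, and_true]
      push_cast
      ring
    · have e1 : (decide (p x)) = false := by simpa using hx
      have e2 : (decide (¬ p x)) = true := by simpa using hx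
      rw [if_neg hx, ih, e1, e2, if_neg (by simp), if_pos rfl]
      simp only [Prod.mk.injEq]
      constructor
      · push_cast; ring
      · rw [List.map_cons, List.append_assoc, List.singleton_append]

-- the two programs agree whenever the exact quotient q is positive (the generic case)
lemma main_pos_case (g L q : Int) (hL : L ≠ 0) (hq : 0 < q) (hgq : q * L = g) :
    ((PySem.List.pyRange 1 (q + 1) 1).foldl
      (fun (s : Int × List Int) i =>
        if PySem.Int.mod g (L * i) ≠ 0 then (s.1 - 1, s.2)
        else (s.1, s.2 ++ [L * i])) (q, []))
    = (((PySem.List.sorted (divLoop q 1 []) (fun x => x) false).length : Int),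
       (PySem.List.sorted (divLoop q 1 []) (fun x => x) false).map (fun d => L * d)) := by
  rw [divLoop_sorted q hq]
  rw [foldA_shape (fun i => PySem.Int.mod g (L * i) ≠ 0) (fun i => L * i) _ q []]
  have hcond : ∀ i : Int, 1 ≤ i → ((PySem.Int.mod g (L * i) ≠ 0) ↔ ¬ (i ∣ q)) := by
    intro i hi
    rw [not_iff_not, PySem.Int.mod_eq_zero_iff_dvd]
    subst hgq
    rw [mul_comm q L]
    exact mul_dvd_mul_iff_left hL
  have hfilter : (PySem.List.pyRange 1 (q + 1) 1).filter
      (fun i => decide (¬ PySem.Int.mod g (L * i) ≠ 0)) = ascDivs q := by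
    unfold ascDivs
    refine List.filter_congr ?_
    intro x hx
    rw [PySem.List.mem_pyRange_one] at hx
    simp only [decide_eq_decide]
    rw [not_iff_comm, ← hcond x hx.1]
  have hcount : (PySem.List.pyRange 1 (q + 1) 1).countP
      (fun i => decide (PySem.Int.mod g (L * i) ≠ 0))
      = (PySem.List.pyRange 1 (q + 1) 1).length - (ascDivs q).length := by
    have h1 : (PySem.List.pyRange 1 (q + 1) 1).length
        = (PySem.List.pyRange 1 (q + 1) 1).countP (fun i => decide (PySem.Int.mod g (L * i) ≠ 0))
          + (PySem.List.pyRange 1 (q + 1) 1).countP (fun i => decide (¬ PySem.Int.mod g (L * i) ≠ 0)) := by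
      rw [List.length_eq_countP_add_countP (fun i => decide (PySem.Int.mod g (L * i) ≠ 0))]
      congr 1
      refine List.countP_congr ?_
      intro x hx
      simp
    have h2 : (PySem.List.pyRange 1 (q + 1) 1).countP (fun i => decide (¬ PySem.Int.mod g (L * i) ≠ 0))
        = (ascDivs q).length := by
      rw [← hfilter, List.countP_eq_length_filter]
    omega
  rw [hcount, hfilter]
  have hlenr : (PySem.List.pyRange 1 (q + 1) 1).length = q.toNat := by
    rw [PySem.List.length_pyRange_one]; omega
  have hlelen : (ascDivs q).length ≤ q.toNat := by
    rw [← hlenr]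
    exact List.length_filter_le _ _
  rw [hlenr]
  simp only [Prod.mk.injEq]
  constructor
  · push_cast [Nat.cast_sub hlelen]
    omega
  · rfl

-- mod/div bridges under divisibility
lemma truncdiv_eq (g L : Int) (h : L ∣ g) : PySem.Int.truncdiv g L = g / L := by
  unfold PySem.Int.truncdiv
  exact Int.tdiv_eq_ediv_of_dvd h

lemma floordiv_eq (g L : Int) (h : L ∣ g) : PySem.Int.floordiv g L = g / L := by
  unfold PySem.Int.floordiv
  exact Int.fdiv_eq_ediv_of_dvd h

-- b's singleton-negative clause in D_ restated over bh :: bt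
lemma singleton_clause (bh : Int) (bt : List Int) :
    ((bh :: bt).length = 1 ∧ ∀ x ∈ bh :: bt, x < 0) ↔ (bt = [] ∧ bh < 0) := by
  cases bt <;> simp

lemma sorted_nil_int : PySem.List.sorted ([] : List Int) (fun x : Int => x) false = [] :=
  List.Perm.eq_nil (PySem.List.sorted_perm [] (fun x : Int => x) false)

theorem get_between_two_sets_spec : Claim_unchanged_get_between_two_sets := by
  unfold Claim_unchanged_get_between_two_sets
  intro a b _ hpre
  unfold Spec_get_between_two_sets
  intro hND
  obtain ⟨ha, hb, h0⟩ := hpre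
  obtain ⟨ah, at_⟩ := List.exists_cons_of_ne_nil ha
  obtain ⟨t, rfl⟩ := at_
  obtain ⟨bh, bt_⟩ := List.exists_cons_of_ne_nil hb
  obtain ⟨u, rfl⟩ := bt_
  obtain ⟨hL0, hLabs, hLneg⟩ := L_facts ah t h0
  obtain ⟨hGabs, hGneg⟩ := G_facts bh u
  set L := t.foldl pyLcm ah with hLdef
  set g := u.foldl gcdF bh with hGdef
  have hgF : u.foldl (fun x y => (Int.gcd x y : Int)) bh = g := rfl
  have hLalt : t.foldl (fun x y => PySem.Int.floordiv (x * y) (Int.gcd x y : Int)) ah = L := rfl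
  have hApy : t.foldl pyLcm ah = L := rfl
  simp only [get_between_two_sets, get_between_two_sets_alt, pyReduce]
  rw [hgF, hLalt, hApy]
  by_cases hdvd : L ∣ g
  · have hmod : PySem.Int.mod g L = 0 := (PySem.Int.mod_eq_zero_iff_dvd g L).mpr hdvd
    rw [if_neg (by simp [hmod]), if_neg (by simp [hmod])]
    have htd : PySem.Int.truncdiv g L = g / L := truncdiv_eq g L hdvd
    have hfd : PySem.Int.floordiv g L = g / L := floordiv_eq g L hdvd
    set q := g / L with hqdef
    have hgq : q * L = g := Int.ediv_mul_cancel hdvd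
    rw [htd, hfd]
    rcases lt_trichotomy q 0 with hq | hq | hq
    · -- q < 0: this is exactly D_, contradiction with hND
      exfalso
      apply hND
      have hgne : g ≠ 0 := by
        rw [← hgq]
        exact mul_ne_zero (by omega) hL0
      refine ⟨?_, ?_, ?_⟩
      · have hx : L < 0 ↔ ¬ (g < 0) := by
          constructor
          · intro hL hg
            nlinarith
          · intro hg
            by_contra hL
            push_neg at hL
            have hLpos : 0 < L := by omega
            have : g < 0 := by nlinarith [mul_neg_of_neg_of_pos hq hLpos]
            omega
        rw [← hLneg, singleton_clause, ← hGneg]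
        exact hx
      · rw [← hGabs]
        intro h
        exact hgne (by omega)
      · rw [← hLabs, ← hGabs]
        exact Int.natAbs_dvd_natAbs.mpr hdvd
    · -- q = 0: both return (0, [])
      rw [hq]
      rw [PySem.List.pyRange_one_eq_nil (by omega)]
      have hloop : divLoop 0 1 [] = [] := rfl
      rw [hloop, sorted_nil_int]
      simp
    · -- q > 0: the generic case
      exact main_pos_case g L q hL0 hq hgq
  · have hmod : PySem.Int.mod g L ≠ 0 := fun h => hdvd ((PySem.Int.mod_eq_zero_iff_dvd g L).mp h)
    rw [if_pos (by simp [hmod]), if_pos (by simp [hmod])]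

theorem get_between_two_sets_changed : Claim_changed_get_between_two_sets := by
  unfold Claim_changed_get_between_two_sets; decide

theorem get_between_two_sets_tight : Claim_exact_get_between_two_sets := by
  unfold Claim_exact_get_between_two_sets
  intro a b _ hpre hD
  obtain ⟨ha, hb, h0⟩ := hpre
  obtain ⟨ah, at_⟩ := List.exists_cons_of_ne_nil ha
  obtain ⟨t, rfl⟩ := at_
  obtain ⟨bh, bt_⟩ := List.exists_cons_of_ne_nil hb
  obtain ⟨u, rfl⟩ := bt_
  obtain ⟨hD1, hD2, hD3⟩ := hD
  obtain ⟨hL0, hLabs, hLneg⟩ := L_facts ah t h0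
  obtain ⟨hGabs, hGneg⟩ := G_facts bh u
  set L := t.foldl pyLcm ah with hLdef
  set g := u.foldl gcdF bh with hGdef
  have hdvd : L ∣ g := Int.natAbs_dvd_natAbs.mp (by rw [hLabs, hGabs]; exact hD3)
  have hgne : g ≠ 0 := by
    intro h
    apply hD2
    rw [← hGabs, h]
    rfl
  have hsign : L < 0 ↔ ¬ (g < 0) := by
    rw [← hLneg, singleton_clause, ← hGneg] at hD1
    exact hD1
  have hmod : PySem.Int.mod g L = 0 := (PySem.Int.mod_eq_zero_iff_dvd g L).mpr hdvd
  have htd : PySem.Int.truncdiv g L = g / L := truncdiv_eq g L hdvd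
  have hfd : PySem.Int.floordiv g L = g / L := floordiv_eq g L hdvd
  set q := g / L with hqdef
  have hgq : q * L = g := Int.ediv_mul_cancel hdvd
  have hqneg : q < 0 := by
    rcases lt_trichotomy q 0 with h | h | h
    · exact h
    · exfalso; apply hgne; rw [← hgq, h]; ring
    · exfalso
      rcases lt_or_gt_of_ne hL0 with hL | hL
      · have hgneg : g < 0 := by nlinarith [mul_neg_of_pos_of_neg h hL]
        exact (hsign.mp hL) hgneg
      · have hgpos : 0 < g := by nlinarith [mul_pos h hL]
        exact absurd (by omega : ¬ g < 0) (fun hh => by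
          have := hsign.mpr hh
          omega)
  have hgF : u.foldl (fun x y => (Int.gcd x y : Int)) bh = g := rfl
  have hLalt : t.foldl (fun x y => PySem.Int.floordiv (x * y) (Int.gcd x y : Int)) ah = L := rfl
  have hApy : t.foldl pyLcm ah = L := rfl
  simp only [get_between_two_sets, get_between_two_sets_alt, pyReduce]
  rw [hgF, hLalt, hApy]
  rw [if_neg (by simp [hmod]), if_neg (by simp [hmod]), htd, hfd]
  rw [PySem.List.pyRange_one_eq_nil (by omega)]
  have hloop : divLoop q 1 [] = [] := by
    unfold divLoop
    have hz : (q + 1 - 1).toNat = 0 := by omega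
    rw [hz]
    rfl
  rw [hloop, sorted_nil_int]
  simp only [List.foldl_nil, List.map_nil, List.length_nil, Nat.cast_zero]
  intro h
  have hfst := congrArg Prod.fst h
  simp only at hfst
  omega
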